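-- pv_equiv track=rewrite | github.com/DiegoCico/MiniPrezzy | main.py | filter_similar
-- ===== SOURCE A (Python) =====
-- def filter_similar(roles, keyword="data"):
--     filtered = []
--     found = False
--     for role, salary in roles:
--         if keyword in role.lower():
--             if not found:
--                 filtered.append((role, salary))
--                 found = True
--         else:
--             filtered.append((role, salary))
--     return filtered
-- ===== SOURCE B (Python) =====
-- def filter_similar(roles, keyword="data"):
--     first = next((i for i, (role, _) in enumerate(roles) if keyword in role.lower()), None)
--     return [pair for i, pair in enumerate(roles)
--             if keyword not in pair[0].lower() or i == first]
-- ===== Notes on version B (the rewrite author's own statement) =====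
-- stated objective: alternative
-- what changed: Replaces the single stateful pass with a toggling found flag by a two-pass decomposition: first compute the index of the first keyword-matching role, then filter by a comprehension keeping non-matching rows and the row at that index.
import Mathlib
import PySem

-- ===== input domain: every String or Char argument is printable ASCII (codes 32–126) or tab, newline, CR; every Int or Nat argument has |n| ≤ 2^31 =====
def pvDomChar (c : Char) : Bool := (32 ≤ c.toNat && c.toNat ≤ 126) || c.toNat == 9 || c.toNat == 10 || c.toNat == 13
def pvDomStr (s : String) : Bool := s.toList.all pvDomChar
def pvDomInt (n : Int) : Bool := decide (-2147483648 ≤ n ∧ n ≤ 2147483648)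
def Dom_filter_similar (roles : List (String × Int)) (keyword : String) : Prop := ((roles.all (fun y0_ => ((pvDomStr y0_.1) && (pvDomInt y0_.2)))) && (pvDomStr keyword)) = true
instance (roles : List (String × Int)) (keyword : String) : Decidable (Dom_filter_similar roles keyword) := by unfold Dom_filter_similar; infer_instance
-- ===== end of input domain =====

-- B replaces A's single stateful pass (a toggling `found` flag) by two passes: find the
-- index of the first keyword match, then filter by that index; same cost, different shape.

-- ===== PORT A =====
def filter_similar (roles : List (String × Int)) (keyword : String) : List (String × Int) :=
  (roles.foldl
    (fun (st : List (String × Int) × Bool) rs =>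
      if PySem.Str.isIn keyword (PySem.Str.lower rs.1) then
        if !st.2 then (st.1 ++ [rs], true) else st
      else (st.1 ++ [rs], st.2))
    (([] : List (String × Int)), false)).1

-- ===== PORT B =====
def filter_similar_alt (roles : List (String × Int)) (keyword : String) : List (String × Int) :=
  let first : Option Int :=
    ((PySem.List.enumerate roles 0).find?
      (fun q => PySem.Str.isIn keyword (PySem.Str.lower q.2.1))).map (·.1)
  (PySem.List.enumerate roles 0).filterMap (fun q =>
    if !(PySem.Str.isIn keyword (PySem.Str.lower q.2.1)) || first == some q.1 then some q.2
    else none)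

-- ===== PRECONDITION & SPEC =====
def Spec_filter_similar (roles : List (String × Int)) (keyword : String) (out : List (String × Int)) : Prop := out = filter_similar_alt roles keyword
instance (roles : List (String × Int)) (keyword : String) (out : List (String × Int)) : Decidable (Spec_filter_similar roles keyword out) := by unfold Spec_filter_similar; infer_instance

-- ===== CLAIM (what is proved, stated in full; the proofs are below) =====
def Claim_equal_filter_similar : Prop := ∀ (roles : List (String × Int)) (keyword : String), Dom_filter_similar roles keyword → Spec_filter_similar roles keyword (filter_similar roles keyword)

-- ===== LEMMAS AND PROOFS =====

def pKW (kw : String) (rs : String × Int) : Bool :=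
  PySem.Str.isIn kw (PySem.Str.lower rs.1)

-- canonical form: keep everything up to and including the first match, then only non-matches
def canonFS (kw : String) : List (String × Int) → List (String × Int)
  | [] => []
  | x :: t => if pKW kw x then x :: t.filter (fun rs => !pKW kw rs) else x :: canonFS kw t

-- A's loop as structural recursion over the `found` state
def loopA (kw : String) : List (String × Int) → Bool → List (String × Int)
  | [], _ => []
  | rs :: t, found =>
    if pKW kw rs then (if !found then rs :: loopA kw t true else loopA kw t found)
    else rs :: loopA kw t found

theorem foldA_eq (kw : String) (t : List (String × Int)) (acc : List (String × Int)) (found : Bool) :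
    (t.foldl
      (fun (st : List (String × Int) × Bool) rs =>
        if PySem.Str.isIn kw (PySem.Str.lower rs.1) then
          if !st.2 then (st.1 ++ [rs], true) else st
        else (st.1 ++ [rs], st.2))
      (acc, found)).1 = acc ++ loopA kw t found := by
  induction t generalizing acc found with
  | nil => simp [loopA]
  | cons x t ih =>
    rw [List.foldl_cons]
    by_cases hx : PySem.Str.isIn kw (PySem.Str.lower x.1) = true
    · have hx2 : PySem.Chars.isIn kw.toList (PySem.Chars.lower x.1.toList) = true := by
        simpa using hx
      rw [if_pos hx]
      cases found
      · rw [show (if (!((acc, false) : List (String × Int) × Bool).2) = true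
              then ((acc, false).1 ++ [x], true) else (acc, false)) = (acc ++ [x], true) from rfl,
            ih]
        simp [loopA, pKW, hx2]
      · rw [show (if (!((acc, true) : List (String × Int) × Bool).2) = true
              then ((acc, true).1 ++ [x], true) else (acc, true)) = (acc, true) from rfl,
            ih]
        simp [loopA, pKW, hx2]
    · have hx2 : PySem.Chars.isIn kw.toList (PySem.Chars.lower x.1.toList) = false := by
        simpa using hx
      rw [if_neg hx, ih]
      simp [loopA, pKW, hx2]

theorem loopA_true (kw : String) (t : List (String × Int)) :
    loopA kw t true = t.filter (fun rs => !pKW kw rs) := by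
  induction t with
  | nil => rfl
  | cons x t ih =>
    simp only [loopA, List.filter_cons]
    by_cases hx : pKW kw x = true <;> simp [hx, ih]

theorem loopA_eq_canon (kw : String) (t : List (String × Int)) :
    loopA kw t false = canonFS kw t := by
  induction t with
  | nil => rfl
  | cons x t ih =>
    simp only [loopA, canonFS]
    by_cases hx : pKW kw x = true <;> simp [hx, ih, loopA_true]

-- B's tail filter once the first match is fixed at an index below every remaining index
theorem filterMap_no_hit (kw : String) (s : Int) (t : List (String × Int)) (s' : Int) (hs : s < s') :
    (PySem.List.enumerate t s').filterMap (fun q =>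
      if !(pKW kw q.2) || (some s == some q.1) then some q.2 else none)
      = t.filter (fun rs => !pKW kw rs) := by
  induction t generalizing s' with
  | nil => simp [PySem.List.enumerate_nil]
  | cons x t ih =>
    have hne : s ≠ s' := by omega
    rw [PySem.List.enumerate_cons, List.filterMap_cons, List.filter_cons,
      ih (s' + 1) (by omega)]
    by_cases hx : pKW kw x = true
    · rw [if_neg (by simp [hx, hne]), if_neg (by simp [hx])]
    · have hx' : pKW kw x = false := by simpa using hx
      rw [if_pos (by simp [hx']), if_pos (by simp [hx'])]

-- B, generalized over the enumeration start, equals the canonical form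
theorem alt_gen (kw : String) (t : List (String × Int)) (s : Int) :
    (PySem.List.enumerate t s).filterMap (fun q =>
      if !(pKW kw q.2) ||
        (((PySem.List.enumerate t s).find? (fun q => pKW kw q.2)).map (·.1) == some q.1)
      then some q.2 else none)
      = canonFS kw t := by
  induction t generalizing s with
  | nil => simp [PySem.List.enumerate_nil, canonFS]
  | cons x t ih =>
    simp only [PySem.List.enumerate_cons, List.find?_cons, canonFS]
    by_cases hx : pKW kw x = true
    · simp only [hx]
      simp only [List.filterMap_cons, Option.map_some]
      have : (!pKW kw x || (some s == some s)) = true := by simp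
      rw [if_pos this]
      exact congrArg (x :: ·) (filterMap_no_hit kw s t (s + 1) (by omega))
    · have hx' : pKW kw x = false := by simpa using hx
      simp only [hx', Bool.false_eq_true, if_false]
      simp only [List.filterMap_cons]
      have hfst :
          ((PySem.List.enumerate t (s + 1)).find? (fun q => pKW kw q.2)).map (·.1) ≠ some s := by
        intro h
        obtain ⟨q, hq, hq1⟩ := Option.map_eq_some_iff.mp h
        have hmem : q ∈ PySem.List.enumerate t (s + 1) := List.mem_of_find?_eq_some hq
        obtain ⟨k, hk, rfl⟩ := (PySem.List.mem_enumerate_iff _ _ _).mp hmem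
        simp at hq1; omega
      have hcond : (!pKW kw x ||
          (((PySem.List.enumerate t (s + 1)).find? (fun q => pKW kw q.2)).map (·.1) == some s))
          = true := by
        simp [hx']
      rw [if_pos hcond]
      exact congrArg (x :: ·) (ih (s + 1))

-- ===== VERDICT (by name: the statement is the Claim_ definition above) =====
theorem filter_similar_spec : Claim_equal_filter_similar := by
  intro roles keyword _
  show filter_similar roles keyword = filter_similar_alt roles keyword
  unfold filter_similar filter_similar_alt
  rw [foldA_eq, List.nil_append, loopA_eq_canon]
  exact (alt_gen keyword roles 0).symm
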